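-- pv_equiv track=rewrite | github.com/openai/parameter-golf | train_gpt_mlx.py | token_chunks
-- ===== SOURCE A (Python) =====
-- def token_chunks(total_tokens: int, seq_len: int, max_chunk_tokens: int) -> list[int]:
--     usable_total = (total_tokens // seq_len) * seq_len
--     if usable_total <= 0:
--         raise ValueError(f"token budget too small for seq_len={seq_len}")
--     usable_chunk = max((max_chunk_tokens // seq_len) * seq_len, seq_len)
--     chunks: list[int] = []
--     remaining = usable_total
--     while remaining > 0:
--         chunk = min(remaining, usable_chunk)
--         chunks.append(chunk)
--         remaining -= chunk
--     return chunks
-- ===== SOURCE B (Python) =====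
-- def token_chunks(total_tokens: int, seq_len: int, max_chunk_tokens: int) -> list[int]:
--     usable_total = (total_tokens // seq_len) * seq_len
--     if usable_total <= 0:
--         raise ValueError(f"token budget too small for seq_len={seq_len}")
--     usable_chunk = max((max_chunk_tokens // seq_len) * seq_len, seq_len)
--     q, r = divmod(usable_total, usable_chunk)
--     return [usable_chunk] * q + ([r] if r else [])
-- ===== Notes on version B (the rewrite author's own statement) =====
-- stated objective: simpler
-- what changed: Replaces the while loop that peels off one chunk per iteration with a closed-form divmod: q full chunks plus the remainder if nonzero.
import Mathlib
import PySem

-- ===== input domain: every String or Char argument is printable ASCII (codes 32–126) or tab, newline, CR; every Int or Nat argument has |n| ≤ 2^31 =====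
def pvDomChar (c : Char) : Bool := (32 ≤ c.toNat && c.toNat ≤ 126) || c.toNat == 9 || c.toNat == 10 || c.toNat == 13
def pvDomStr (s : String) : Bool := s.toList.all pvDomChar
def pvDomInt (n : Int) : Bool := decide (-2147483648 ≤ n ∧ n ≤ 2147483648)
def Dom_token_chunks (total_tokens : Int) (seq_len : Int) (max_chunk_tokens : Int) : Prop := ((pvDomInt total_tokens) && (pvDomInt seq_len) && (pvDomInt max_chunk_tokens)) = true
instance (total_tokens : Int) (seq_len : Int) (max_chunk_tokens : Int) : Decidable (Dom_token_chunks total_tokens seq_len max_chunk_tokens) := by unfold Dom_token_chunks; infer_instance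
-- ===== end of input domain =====

-- B replaces A's chunk-peeling while loop with a closed-form divmod construction (simpler, same results).


-- ===== PORT A =====
-- A's while loop; fuel makes it total (each iteration removes min remaining uc; inside
-- Pre_ uc ≥ 1, so usable_total.toNat iterations always suffice).
def tcLoop (uc : Int) : Nat → Int → List Int → List Int
  | 0, _, chunks => chunks
  | fuel + 1, remaining, chunks =>
    if remaining > 0 then
      tcLoop uc fuel (remaining - min remaining uc) (chunks ++ [min remaining uc])
    else chunks

def token_chunks (total_tokens : Int) (seq_len : Int) (max_chunk_tokens : Int) : List Int :=
  let usable_total := PySem.Int.floordiv total_tokens seq_len * seq_len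
  if usable_total ≤ 0 then []  -- raise ValueError (excluded by Pre_)
  else
    let usable_chunk := max (PySem.Int.floordiv max_chunk_tokens seq_len * seq_len) seq_len
    tcLoop usable_chunk usable_total.toNat usable_total []

-- ===== PORT B =====
def token_chunks_alt (total_tokens : Int) (seq_len : Int) (max_chunk_tokens : Int) : List Int :=
  let usable_total := PySem.Int.floordiv total_tokens seq_len * seq_len
  if usable_total ≤ 0 then []  -- raise ValueError (excluded by Pre_)
  else
    let usable_chunk := max (PySem.Int.floordiv max_chunk_tokens seq_len * seq_len) seq_len
    let q := PySem.Int.floordiv usable_total usable_chunk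
    let r := PySem.Int.mod usable_total usable_chunk
    List.replicate q.toNat usable_chunk ++ (if r ≠ 0 then [r] else [])

-- ===== PRECONDITION & SPEC =====
-- Pre_ excludes exactly the inputs on which A does not return: seq_len = 0 (ZeroDivisionError),
-- usable_total ≤ 0 (ValueError), and usable_chunk ≤ 0 (the while loop never terminates).
def Pre_token_chunks (total_tokens : Int) (seq_len : Int) (max_chunk_tokens : Int) : Prop :=
  seq_len ≠ 0 ∧
  0 < PySem.Int.floordiv total_tokens seq_len * seq_len ∧
  0 < max (PySem.Int.floordiv max_chunk_tokens seq_len * seq_len) seq_len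
instance (total_tokens : Int) (seq_len : Int) (max_chunk_tokens : Int) : Decidable (Pre_token_chunks total_tokens seq_len max_chunk_tokens) := by unfold Pre_token_chunks; infer_instance

def pvWitness_token_chunks : Int × Int × Int := (100, 8, 24)

def Spec_token_chunks (total_tokens : Int) (seq_len : Int) (max_chunk_tokens : Int) (out : List Int) : Prop := out = token_chunks_alt total_tokens seq_len max_chunk_tokens
instance (total_tokens : Int) (seq_len : Int) (max_chunk_tokens : Int) (out : List Int) : Decidable (Spec_token_chunks total_tokens seq_len max_chunk_tokens out) := by unfold Spec_token_chunks; infer_instance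

-- ===== CLAIM (what is proved, stated in full; the proofs are below) =====
def Claim_equal_token_chunks : Prop := ∀ (total_tokens : Int) (seq_len : Int) (max_chunk_tokens : Int), Dom_token_chunks total_tokens seq_len max_chunk_tokens → Pre_token_chunks total_tokens seq_len max_chunk_tokens → Spec_token_chunks total_tokens seq_len max_chunk_tokens (token_chunks total_tokens seq_len max_chunk_tokens)

-- ===== LEMMAS AND PROOFS =====

lemma tcLoop_nonpos (uc : Int) (fuel : Nat) (r : Int) (acc : List Int) (h : ¬ r > 0) :
    tcLoop uc fuel r acc = acc := by
  cases fuel with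
  | zero => rfl
  | succ f => simp [tcLoop, h]

-- main loop invariant: with a positive chunk size and enough fuel, the peel-off loop
-- produces exactly q copies of uc followed by the nonzero remainder.
lemma tcLoop_eq (uc : Int) (huc : 0 < uc) :
    ∀ (fuel : Nat) (r : Int) (acc : List Int), 0 < r → r.toNat ≤ fuel →
    tcLoop uc fuel r acc =
      acc ++ List.replicate (PySem.Int.floordiv r uc).toNat uc ++
        (if PySem.Int.mod r uc ≠ 0 then [PySem.Int.mod r uc] else []) := by
  intro fuel
  induction fuel with
  | zero => intro r acc hr hf; omega
  | succ f ih =>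
    intro r acc hr hf
    rw [PySem.Int.floordiv_eq_ediv_of_pos huc, PySem.Int.mod_eq_emod_of_pos huc]
    simp only [tcLoop, hr, if_pos]
    by_cases hle : r ≤ uc
    · have hmin : min r uc = r := min_eq_left hle
      rw [hmin]
      rw [tcLoop_nonpos uc f (r - r) _ (by omega)]
      by_cases heq : r = uc
      · subst heq
        simp [Int.ediv_self huc.ne']
      · have hq : r / uc = 0 := Int.ediv_eq_zero_of_lt (by omega) (by omega)
        have hm : r % uc = r := Int.emod_eq_of_lt (by omega) (by omega)
        simp [hq, hm, hr.ne']
    · have hmin : min r uc = uc := min_eq_right (by omega)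
      rw [hmin]
      have hr' : 0 < r - uc := by omega
      have hf' : (r - uc).toNat ≤ f := by omega
      rw [ih (r - uc) (acc ++ [uc]) hr' hf']
      rw [PySem.Int.floordiv_eq_ediv_of_pos huc, PySem.Int.mod_eq_emod_of_pos huc]
      have hdiv : r / uc = (r - uc) / uc + 1 := by
        conv_lhs => rw [show r = r - uc + 1 * uc by ring]
        rw [Int.add_mul_ediv_right _ _ huc.ne']
      have hmod : r % uc = (r - uc) % uc := by
        conv_lhs => rw [show r = r - uc + 1 * uc by ring]
        simp
      have hqnn : 0 ≤ (r - uc) / uc := Int.ediv_nonneg (by omega) (by omega)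
      have htq : (r / uc).toNat = ((r - uc) / uc).toNat + 1 := by omega
      rw [hdiv, hmod] at *
      rw [htq, List.replicate_succ]
      simp [List.append_assoc]

theorem token_chunks_spec : Claim_equal_token_chunks := by
  intro total seq mc _hd hpre
  obtain ⟨hs, hut, huc⟩ := hpre
  unfold Spec_token_chunks token_chunks token_chunks_alt
  simp only [not_le.mpr hut]
  set ut := PySem.Int.floordiv total seq * seq with hutdef
  set uc := max (PySem.Int.floordiv mc seq * seq) seq with hucdef
  rw [tcLoop_eq uc huc ut.toNat ut [] hut le_rfl]
  simp
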